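-- pv_equiv track=rewrite | github.com/jameswmccarty/lits_puzz | LITS.py | fully_connected
-- ===== SOURCE A (Python) =====
-- from collections import deque
--
-- def fully_connected(set_of_points):
-- 	walk_start = list(set_of_points)[0]
-- 	rebuild = set()
-- 	q = deque()
-- 	q.append(walk_start)
-- 	while q:
-- 		x,y = q.popleft()
-- 		rebuild.add((x,y))
-- 		for dx,dy in ((0,1),(0,-1),(1,0),(-1,0)):
-- 			if (x+dx,y+dy) in set_of_points and (x+dx,y+dy) not in rebuild:
-- 				q.append((x+dx,y+dy))
-- 	if rebuild == set_of_points: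
-- 		return True
-- 	return False
-- ===== SOURCE B (Python) =====
-- def fully_connected(set_of_points):
-- 	label = {p: p for p in set_of_points}
-- 	for (x, y) in set_of_points:
-- 		for nb in ((x, y + 1), (x + 1, y)):
-- 			if nb in label:
-- 				a, b = label[(x, y)], label[nb]
-- 				if a != b:
-- 					label = {q: (a if l == b else l) for q, l in label.items()}
-- 	return len(set(label.values())) <= 1
-- ===== Notes on version B (the rewrite author's own statement) =====
-- stated objective: alternative
-- what changed: Replaces A's BFS worklist flood-fill from the first point by an eager union-find: a label dict maps every point to a component representative, one scan over the points merges the label classes across each right/up neighbour edge (relabelling the absorbed class), and the answer is whether at most one distinct label remains; no frontier/visited set exists.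
-- outside the precondition, e.g. on fully_connected(set()): A raises IndexError, B returns True
import Mathlib
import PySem

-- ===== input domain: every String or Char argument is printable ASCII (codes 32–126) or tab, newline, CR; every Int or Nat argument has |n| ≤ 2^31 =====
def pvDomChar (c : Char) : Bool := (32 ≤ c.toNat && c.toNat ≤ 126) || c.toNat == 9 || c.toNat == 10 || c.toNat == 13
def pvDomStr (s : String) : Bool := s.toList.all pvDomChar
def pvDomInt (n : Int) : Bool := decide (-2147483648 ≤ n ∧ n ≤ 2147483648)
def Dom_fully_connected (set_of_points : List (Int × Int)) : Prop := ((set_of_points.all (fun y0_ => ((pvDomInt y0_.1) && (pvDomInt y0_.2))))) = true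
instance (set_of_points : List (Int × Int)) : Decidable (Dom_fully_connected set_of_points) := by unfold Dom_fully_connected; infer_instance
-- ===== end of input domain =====

-- B replaces A's BFS flood-fill by an eager union-find: a label dict maps each point to a
-- component representative, merged across right/up neighbour edges; connected iff at most
-- one distinct label remains (objective: alternative). Equality is proved on Pre_ below.

-- ===== PORT A =====
-- the four (dx,dy) offsets A iterates over
def pvDirs : List (Int × Int) := [(0,1),(0,-1),(1,0),(-1,0)]

-- points appended to the queue while processing p (rebuild already updated to R')
def bfsApp (s R' : List (Int × Int)) (p : Int × Int) : List (Int × Int) :=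
  pvDirs.filterMap (fun d =>
    if (p.1 + d.1, p.2 + d.2) ∈ s ∧ (p.1 + d.1, p.2 + d.2) ∉ R' then
      some (p.1 + d.1, p.2 + d.2)
    else none)

-- termination measure for A's while-loop (weighted queue size times 6^|uncovered|)
def pvMissA (s R : List (Int × Int)) : Nat := (s.toFinset \ R.toFinset).card
def pvWA (s R q : List (Int × Int)) : Nat :=
  (q.map (fun p => if p ∈ R ∨ p ∉ s then 5 else 1)).sum

lemma pvWA_append (s R a b : List (Int × Int)) :
    pvWA s R (a ++ b) = pvWA s R a + pvWA s R b := by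
  simp [pvWA]

lemma pvWA_fresh (s R app : List (Int × Int))
    (h : ∀ n ∈ app, n ∉ R ∧ n ∈ s) : pvWA s R app = app.length := by
  unfold pvWA
  rw [List.map_congr_left (g := fun _ => 1)]
  · simp [List.map_const']
  · intro n hn
    rcases h n hn with ⟨h1, h2⟩
    simp [h1, h2]

lemma pvWA_le_five (s R q : List (Int × Int)) (p : Int × Int) :
    pvWA s (R ++ [p]) q ≤ 5 * pvWA s R q := by
  induction q with
  | nil => simp [pvWA]
  | cons x xs ih =>
    simp only [pvWA, List.map_cons, List.sum_cons] at *
    have h1 : (if x ∈ R ++ [p] ∨ x ∉ s then 5 else 1) ≤ 5 := by split <;> omega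
    have h2 : (1 : Nat) ≤ (if x ∈ R ∨ x ∉ s then 5 else 1) := by split <;> omega
    omega

lemma pvWA_notin_s (s R q : List (Int × Int)) (p : Int × Int) (hps : p ∉ s) :
    pvWA s (R ++ [p]) q = pvWA s R q := by
  unfold pvWA
  congr 1
  apply List.map_congr_left
  intro x _
  by_cases hx : x = p
  · subst hx; simp [hps]
  · simp [List.mem_append, hx]

lemma bfsApp_fresh (s R' : List (Int × Int)) (p : Int × Int) :
    ∀ n ∈ bfsApp s R' p, n ∉ R' ∧ n ∈ s := by
  intro n hn
  rw [bfsApp, List.mem_filterMap] at hn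
  obtain ⟨d, _, hd⟩ := hn
  split at hd
  · rename_i h
    obtain rfl := Option.some.inj hd
    exact ⟨h.2, h.1⟩
  · cases hd

lemma pvPhi_dec (s R : List (Int × Int)) (p : Int × Int) (qt : List (Int × Int)) :
    pvWA s (PySem.Set.add R p) (qt ++ bfsApp s (PySem.Set.add R p) p) *
        6 ^ pvMissA s (PySem.Set.add R p)
      < pvWA s R (p :: qt) * 6 ^ pvMissA s R := by
  by_cases hp : p ∈ R
  · rw [PySem.Set.add_of_mem hp]
    have happ : ∀ n ∈ bfsApp s R p, n ∉ R ∧ n ∈ s := fun n hn =>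
      ⟨(bfsApp_fresh s R p n hn).1, (bfsApp_fresh s R p n hn).2⟩
    have hlen : (bfsApp s R p).length ≤ 4 :=
      List.length_filterMap_le _ _
    rw [pvWA_append, pvWA_fresh _ _ _ happ]
    have hwp : pvWA s R (p :: qt) = 5 + pvWA s R qt := by simp [pvWA, hp]
    rw [hwp]
    exact (Nat.mul_lt_mul_right (Nat.pow_pos (by norm_num))).mpr (by omega)
  · rw [PySem.Set.add_of_not_mem hp]
    have happ : ∀ n ∈ bfsApp s (R ++ [p]) p, n ∉ R ++ [p] ∧ n ∈ s := fun n hn =>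
      ⟨(bfsApp_fresh s _ p n hn).1, (bfsApp_fresh s _ p n hn).2⟩
    have hlen : (bfsApp s (R ++ [p]) p).length ≤ 4 :=
      List.length_filterMap_le _ _
    have htofin : (R ++ [p]).toFinset = insert p R.toFinset := by
      simp [List.toFinset_append]
    by_cases hps : p ∈ s
    · -- productive pop: uncovered count drops by one
      have hm : pvMissA s (R ++ [p]) = pvMissA s R - 1 := by
        unfold pvMissA
        rw [htofin, Finset.sdiff_insert]
        exact Finset.card_erase_of_mem (by simp [hps, hp])
      have hm1 : 0 < pvMissA s R := by
        unfold pvMissA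
        exact Finset.card_pos.mpr ⟨p, by simp [hps, hp]⟩
      obtain ⟨m, hmeq⟩ : ∃ m, pvMissA s R = m + 1 := ⟨pvMissA s R - 1, by omega⟩
      rw [pvWA_append, pvWA_fresh _ _ _ happ, hm, hmeq]
      simp only [Nat.add_sub_cancel]
      have h5 : pvWA s (R ++ [p]) qt ≤ 5 * pvWA s R qt := pvWA_le_five _ _ _ _
      have hwp : pvWA s R (p :: qt) = 1 + pvWA s R qt := by simp [pvWA, hp, hps]
      rw [hwp]
      calc (pvWA s (R ++ [p]) qt + (bfsApp s (R ++ [p]) p).length) * 6 ^ m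
          ≤ (5 * pvWA s R qt + 4) * 6 ^ m := Nat.mul_le_mul_right _ (by omega)
        _ < (6 * pvWA s R qt + 6) * 6 ^ m :=
            (Nat.mul_lt_mul_right (Nat.pow_pos (by norm_num))).mpr (by omega)
        _ = (1 + pvWA s R qt) * 6 ^ (m + 1) := by ring
    · -- p outside the grid set: uncovered count unchanged, weight drops
      have hm : pvMissA s (R ++ [p]) = pvMissA s R := by
        unfold pvMissA
        rw [htofin, Finset.sdiff_insert]
        exact congrArg Finset.card (Finset.erase_eq_self.mpr (fun hc => hps (List.mem_toFinset.mp (Finset.mem_sdiff.mp hc).1)))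
      rw [pvWA_append, pvWA_fresh _ _ _ happ, hm, pvWA_notin_s s R qt p hps]
      have hwp : pvWA s R (p :: qt) = 5 + pvWA s R qt := by simp [pvWA, hps]
      rw [hwp]
      exact (Nat.mul_lt_mul_right (Nat.pow_pos (by norm_num))).mpr (by omega)

-- A's while-loop: pop from the left, add to rebuild, enqueue unseen in-set neighbours
def bfsLoop (s R q : List (Int × Int)) : List (Int × Int) :=
  match q with
  | [] => R
  | p :: qt =>
    bfsLoop s (PySem.Set.add R p) (qt ++ bfsApp s (PySem.Set.add R p) p)
termination_by pvWA s R q * 6 ^ pvMissA s R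
decreasing_by exact pvPhi_dec s R p qt

-- A raises IndexError on the empty set (list(set_of_points)[0]); [] is outside Pre_
def fully_connected (set_of_points : List (Int × Int)) : Bool :=
  match set_of_points with
  | [] => false
  | walk_start :: _ =>
    if PySem.Set.equal (bfsLoop set_of_points [] [walk_start]) set_of_points then true
    else false

-- ===== PORT B =====
-- the two neighbour offsets B scans (right and up are enough: every grid edge is the
-- right/up edge of one of its endpoints)
def pvNbrs2 (p : Int × Int) : List (Int × Int) := [(p.1, p.2 + 1), (p.1 + 1, p.2)]

-- one neighbour check of B's inner loop: if nb is a point, merge nb's class into p's by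
-- relabelling every point labelled b to a (the dict comprehension in Source B)
def pvMergeNb (lbl : PySem.Dict (Int × Int) (Int × Int)) (p nb : Int × Int) :
    PySem.Dict (Int × Int) (Int × Int) :=
  match lbl.get? nb, lbl.get? p with
  | some b, some a =>
      if a ≠ b then
        PySem.Dict.mk (lbl.items.map (fun kv => (kv.1, if kv.2 = b then a else kv.2)))
      else lbl
  | _, _ => lbl

-- B's inner for-loop over the two neighbour candidates of p
def pvProcess (lbl : PySem.Dict (Int × Int) (Int × Int)) (p : Int × Int) :
    PySem.Dict (Int × Int) (Int × Int) :=
  (pvNbrs2 p).foldl (fun d nb => pvMergeNb d p nb) lbl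

-- label = {p: p for p in set_of_points}; one scan merging classes; count distinct labels
def fully_connected_alt (set_of_points : List (Int × Int)) : Bool :=
  let init := set_of_points.foldl (fun d p => d.insert p p) PySem.Dict.empty
  let fin := set_of_points.foldl pvProcess init
  decide ((PySem.Set.ofList fin.values).length ≤ 1)

-- ===== PRECONDITION & SPEC =====
-- The list encodes a Python set, so its elements are distinct; [] is excluded because A
-- raises IndexError (list(set_of_points)[0]) there.
def Pre_fully_connected (set_of_points : List (Int × Int)) : Prop :=
  set_of_points ≠ [] ∧ set_of_points.Nodup
instance (set_of_points : List (Int × Int)) : Decidable (Pre_fully_connected set_of_points) := by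
  unfold Pre_fully_connected; infer_instance

def pvWitness_fully_connected : (List (Int × Int)) := [(0, 0), (0, 1)]

def Spec_fully_connected (set_of_points : List (Int × Int)) (out : Bool) : Prop := out = fully_connected_alt set_of_points
instance (set_of_points : List (Int × Int)) (out : Bool) : Decidable (Spec_fully_connected set_of_points out) := by unfold Spec_fully_connected; infer_instance

-- ===== CLAIM (what is proved, stated in full; the proofs are below) =====
def Claim_equal_fully_connected : Prop := ∀ (set_of_points : List (Int × Int)), Dom_fully_connected set_of_points → Pre_fully_connected set_of_points → Spec_fully_connected set_of_points (fully_connected set_of_points)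

-- ===== LEMMAS AND PROOFS =====

-- all four neighbours of a point; one 4-connectivity step; reachability inside the set
def pvNbrs (p : Int × Int) : List (Int × Int) :=
  [(p.1, p.2 + 1), (p.1, p.2 - 1), (p.1 + 1, p.2), (p.1 - 1, p.2)]
def pvStep (s : List (Int × Int)) (a b : Int × Int) : Prop := b ∈ s ∧ b ∈ pvNbrs a
def pvReach (s : List (Int × Int)) (st x : Int × Int) : Prop :=
  Relation.ReflTransGen (pvStep s) st x

lemma mem_bfsApp (s R' : List (Int × Int)) (p n : Int × Int) :
    n ∈ bfsApp s R' p ↔ n ∈ pvNbrs p ∧ n ∈ s ∧ n ∉ R' := by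
  rw [bfsApp, List.mem_filterMap]
  simp only [pvDirs, List.mem_cons, List.not_mem_nil, or_false,
    Option.ite_none_right_eq_some, Option.some.injEq, pvNbrs]
  constructor
  · rintro ⟨d, (rfl | rfl | rfl | rfl), hcond, rfl⟩ <;> simp_all [add_zero] <;> tauto
  · rintro ⟨hmem, hs, hR⟩
    rcases hmem with h | h | h | h <;> subst h
    · exact ⟨(0, 1), by tauto, ⟨by simpa using hs, by simpa using hR⟩, by simp⟩
    · exact ⟨(0, -1), by tauto, ⟨by simpa using hs, by simpa using hR⟩, by simp [sub_eq_add_neg]⟩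
    · exact ⟨(1, 0), by tauto, ⟨by simpa using hs, by simpa using hR⟩, by simp⟩
    · exact ⟨(-1, 0), by tauto, ⟨by simpa using hs, by simpa using hR⟩, by simp [sub_eq_add_neg]⟩

lemma bfs_subset (s : List (Int × Int)) :
    ∀ (R q : List (Int × Int)), R ⊆ bfsLoop s R q ∧ q ⊆ bfsLoop s R q := by
  intro R q
  induction R, q using bfsLoop.induct s with
  | case1 R => simp [bfsLoop]
  | case2 R p qt ih =>
    rw [bfsLoop]
    refine ⟨?_, ?_⟩
    · intro x hx
      exact ih.1 ((PySem.Set.mem_add _ _ _).mpr (Or.inl hx))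
    · intro x hx
      rcases List.mem_cons.mp hx with rfl | hx
      · exact ih.1 ((PySem.Set.mem_add _ _ _).mpr (Or.inr rfl))
      · exact ih.2 (List.mem_append_left _ hx)

lemma bfs_sound (s : List (Int × Int)) (start : Int × Int) :
    ∀ (R q : List (Int × Int)), (∀ x ∈ R, pvReach s start x) →
      (∀ x ∈ q, pvReach s start x) →
      ∀ x ∈ bfsLoop s R q, pvReach s start x := by
  intro R q
  induction R, q using bfsLoop.induct s with
  | case1 R =>
    intro hR _ x hx
    exact hR x (by simpa [bfsLoop] using hx)
  | case2 R p qt ih =>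
    intro hR hq x hx
    rw [bfsLoop] at hx
    have hp : pvReach s start p := hq p (List.mem_cons_self ..)
    refine ih ?_ ?_ x hx
    · intro y hy
      rcases (PySem.Set.mem_add _ _ _).mp hy with hy | rfl
      · exact hR y hy
      · exact hp
    · intro y hy
      rcases List.mem_append.mp hy with hy | hy
      · exact hq y (List.mem_cons_of_mem _ hy)
      · have h := (mem_bfsApp s _ p y).mp hy
        exact Relation.ReflTransGen.tail hp ⟨h.2.1, h.1⟩

lemma bfs_closed (s : List (Int × Int)) :
    ∀ (R q : List (Int × Int)),
      (∀ p ∈ R, ∀ n, pvStep s p n → n ∈ R ∨ n ∈ q) →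
      ∀ p ∈ bfsLoop s R q, ∀ n, pvStep s p n → n ∈ bfsLoop s R q := by
  intro R q
  induction R, q using bfsLoop.induct s with
  | case1 R =>
    intro h p hp n hstep
    rw [bfsLoop] at hp ⊢
    rcases h p hp n hstep with h1 | h1
    · exact h1
    · cases h1
  | case2 R p qt ih =>
    intro h
    rw [bfsLoop]
    apply ih
    intro p0 hp0 n hstep
    rcases (PySem.Set.mem_add _ _ _).mp hp0 with hp0 | rfl
    · rcases h p0 hp0 n hstep with h1 | h1
      · exact Or.inl ((PySem.Set.mem_add _ _ _).mpr (Or.inl h1))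
      · rcases List.mem_cons.mp h1 with rfl | h1
        · exact Or.inl ((PySem.Set.mem_add _ _ _).mpr (Or.inr rfl))
        · exact Or.inr (List.mem_append_left _ h1)
    · by_cases hn : n ∈ PySem.Set.add R p0
      · exact Or.inl hn
      · exact Or.inr (List.mem_append_right _
          ((mem_bfsApp s _ p0 n).mpr ⟨hstep.2, hstep.1, hn⟩))

lemma bfs_spec (s : List (Int × Int)) (start : Int × Int) :
    ∀ x, x ∈ bfsLoop s [] [start] ↔ pvReach s start x := by
  intro x
  constructor
  · exact fun hx => bfs_sound s start [] [start] (by simp)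
      (fun y hy => by rw [List.mem_singleton] at hy; subst hy; exact .refl) x hx
  · intro hr
    induction hr with
    | refl => exact (bfs_subset s [] [start]).2 (List.mem_singleton_self _)
    | tail _ hstep ih => exact bfs_closed s [] [start] (by simp) _ ih _ hstep

lemma reach_mem (s : List (Int × Int)) (start x : Int × Int) (hs : start ∈ s)
    (h : pvReach s start x) : x ∈ s := by
  induction h with
  | refl => exact hs
  | tail _ hstep _ => exact hstep.1

-- adjacency is symmetric
lemma nbrs_symm (a b : Int × Int) (h : b ∈ pvNbrs a) : a ∈ pvNbrs b := by
  obtain ⟨a1, a2⟩ := a; obtain ⟨b1, b2⟩ := b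
  simp only [pvNbrs, List.mem_cons, List.not_mem_nil, or_false, Prod.mk.injEq] at *
  rcases h with ⟨h1, h2⟩ | ⟨h1, h2⟩ | ⟨h1, h2⟩ | ⟨h1, h2⟩ <;> omega

lemma reach_symm (s : List (Int × Int)) (a b : Int × Int) (ha : a ∈ s)
    (h : pvReach s a b) : pvReach s b a := by
  induction h with
  | refl => exact .refl
  | @tail c d hcd hstep ih =>
    have hc : c ∈ s := reach_mem s a c ha hcd
    exact Relation.ReflTransGen.trans
      (Relation.ReflTransGen.single ⟨hc, nbrs_symm c d hstep.2⟩) ih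

-- B-side: the label function of a dict state
def pvLf (d : PySem.Dict (Int × Int) (Int × Int)) (x : Int × Int) : Int × Int :=
  (d.get? x).getD x

-- relabelling commutes with lookup
lemma get?_relabel (l : List ((Int × Int) × (Int × Int))) (b a x : Int × Int) :
    (PySem.Dict.mk (l.map (fun kv => (kv.1, if kv.2 = b then a else kv.2)))).get? x
      = ((PySem.Dict.mk l).get? x).map (fun v => if v = b then a else v) := by
  induction l with
  | nil => rfl
  | cons kv t ih =>
    obtain ⟨k, v⟩ := kv
    simp only [List.map_cons, PySem.Dict.get?_mk_cons]
    split
    · rfl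
    · exact ih

lemma keys_mergeNb (d : PySem.Dict (Int × Int) (Int × Int)) (p nb : Int × Int) :
    (pvMergeNb d p nb).keys = d.keys := by
  unfold pvMergeNb
  split
  · split
    · simp [PySem.Dict.keys, List.map_map, Function.comp]
    · rfl
  · rfl

lemma keys_process (d : PySem.Dict (Int × Int) (Int × Int)) (p : Int × Int) :
    (pvProcess d p).keys = d.keys := by
  unfold pvProcess pvNbrs2
  simp [List.foldl_cons, keys_mergeNb]

lemma keys_foldl_process (l : List (Int × Int)) (d : PySem.Dict (Int × Int) (Int × Int)) :
    (l.foldl pvProcess d).keys = d.keys := by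
  induction l generalizing d with
  | nil => rfl
  | cons p t ih => simp [List.foldl_cons, ih, keys_process]

-- characterization of one merge step: identity, or a pointwise relabel b→a of an edge p–nb
lemma mergeNb_cases (d : PySem.Dict (Int × Int) (Int × Int)) (p nb : Int × Int) :
    pvMergeNb d p nb = d ∨
    ∃ a b, d.get? p = some a ∧ d.get? nb = some b ∧ a ≠ b ∧
      ∀ x, (pvMergeNb d p nb).get? x = (d.get? x).map (fun v => if v = b then a else v) := by
  unfold pvMergeNb
  rcases h1 : d.get? nb with _ | b
  · simp
  rcases h2 : d.get? p with _ | a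
  · simp
  simp only []
  by_cases hab : a = b
  · rw [if_neg (by simp [hab])]
    exact Or.inl rfl
  · rw [if_pos hab]
    refine Or.inr ⟨a, b, rfl, rfl, hab, ?_⟩
    intro x
    rw [get?_relabel]

lemma mem_keys_get? (d : PySem.Dict (Int × Int) (Int × Int)) (x : Int × Int)
    (h : x ∈ d.keys) : ∃ v, d.get? x = some v := by
  rcases hx : d.get? x with _ | v
  · exact absurd ((PySem.Dict.get?_eq_none_iff_not_mem_keys d x).mp hx) (not_not_intro h)
  · exact ⟨v, rfl⟩

lemma pvLf_of_get? (d : PySem.Dict (Int × Int) (Int × Int)) (x v : Int × Int)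
    (h : d.get? x = some v) : pvLf d x = v := by simp [pvLf, h]

-- soundness invariant: equal labels imply reachability inside s
def pvSound (s : List (Int × Int)) (d : PySem.Dict (Int × Int) (Int × Int)) : Prop :=
  ∀ x ∈ s, ∀ y ∈ s, pvLf d x = pvLf d y → pvReach s x y

lemma sound_mergeNb (s : List (Int × Int)) (d : PySem.Dict (Int × Int) (Int × Int))
    (p nb : Int × Int) (hk : d.keys = s) (hp : p ∈ s) (hnb : nb ∈ pvNbrs p)
    (hS : pvSound s d) : pvSound s (pvMergeNb d p nb) := by
  rcases mergeNb_cases d p nb with hid | ⟨a, b, hga, hgb, hab, hall⟩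
  · rwa [hid]
  have hnbs : nb ∈ s := by
    rw [← hk]
    by_contra hc
    rw [(PySem.Dict.get?_eq_none_iff_not_mem_keys d nb).mpr hc] at hgb
    cases hgb
  have hpnb : pvReach s p nb := Relation.ReflTransGen.single ⟨hnbs, hnb⟩
  intro x hx y hy heq
  obtain ⟨u, hu⟩ := mem_keys_get? d x (hk ▸ hx)
  obtain ⟨v, hv⟩ := mem_keys_get? d y (hk ▸ hy)
  have hx' : pvLf (pvMergeNb d p nb) x = if u = b then a else u := by
    simp [pvLf, hall x, hu]
  have hy' : pvLf (pvMergeNb d p nb) y = if v = b then a else v := by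
    simp [pvLf, hall y, hv]
  rw [hx', hy'] at heq
  have hLx : pvLf d x = u := pvLf_of_get? d x u hu
  have hLy : pvLf d y = v := pvLf_of_get? d y v hv
  have hLp : pvLf d p = a := pvLf_of_get? d p a hga
  have hLnb : pvLf d nb = b := pvLf_of_get? d nb b hgb
  by_cases huv : u = v
  · exact hS x hx y hy (by rw [hLx, hLy, huv])
  · by_cases hub : u = b
    · have hvb : v ≠ b := fun hc => huv (hub.trans hc.symm)
      rw [if_pos hub, if_neg hvb] at heq
      -- v = a : y is in p's class, x in nb's class
      have h1 : pvReach s x nb := hS x hx nb hnbs (by rw [hLx, hLnb, hub])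
      have h2 : pvReach s y p := hS y hy p hp (by rw [hLy, hLp, heq])
      exact Relation.ReflTransGen.trans h1 (Relation.ReflTransGen.trans
        (reach_symm s p nb hp hpnb) (reach_symm s y p hy h2))
    · by_cases hvb : v = b
      · rw [if_neg hub, if_pos hvb] at heq
        have h1 : pvReach s x p := hS x hx p hp (by rw [hLx, hLp, heq])
        have h2 : pvReach s y nb := hS y hy nb hnbs (by rw [hLy, hLnb, hvb])
        exact Relation.ReflTransGen.trans h1 (Relation.ReflTransGen.trans hpnb
          (reach_symm s y nb hy h2))
      · rw [if_neg hub, if_neg hvb] at heq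
        exact absurd heq huv

-- labels never split: equal labels stay equal through a merge
lemma mono_mergeNb (d : PySem.Dict (Int × Int) (Int × Int)) (p nb x y : Int × Int)
    (hx : x ∈ d.keys) (hy : y ∈ d.keys) (heq : pvLf d x = pvLf d y) :
    pvLf (pvMergeNb d p nb) x = pvLf (pvMergeNb d p nb) y := by
  rcases mergeNb_cases d p nb with hid | ⟨a, b, _, _, _, hall⟩
  · rwa [hid]
  obtain ⟨u, hu⟩ := mem_keys_get? d x hx
  obtain ⟨v, hv⟩ := mem_keys_get? d y hy
  have : u = v := by
    rw [pvLf_of_get? d x u hu, pvLf_of_get? d y v hv] at heq; exact heq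
  subst this
  simp [pvLf, hall x, hall y, hu, hv]

-- after merging edge p–nb (both keys), p and nb carry the same label
lemma lf_mergeNb_edge (d : PySem.Dict (Int × Int) (Int × Int)) (p nb : Int × Int)
    (hp : p ∈ d.keys) (hnb : nb ∈ d.keys) :
    pvLf (pvMergeNb d p nb) p = pvLf (pvMergeNb d p nb) nb := by
  obtain ⟨a, ha⟩ := mem_keys_get? d p hp
  obtain ⟨b, hb⟩ := mem_keys_get? d nb hnb
  unfold pvMergeNb
  simp only [ha, hb]
  by_cases h : a = b
  · rw [if_neg (by simp [h])]
    rw [pvLf_of_get? d p a ha, pvLf_of_get? d nb b hb, h]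
  · rw [if_pos h]
    rw [pvLf, pvLf, get?_relabel d.items b a p, get?_relabel d.items b a nb]
    simp [ha, hb, h]

lemma sound_process (s : List (Int × Int)) (d : PySem.Dict (Int × Int) (Int × Int))
    (p : Int × Int) (hk : d.keys = s) (hp : p ∈ s) (hS : pvSound s d) :
    pvSound s (pvProcess d p) := by
  unfold pvProcess pvNbrs2
  simp only [List.foldl_cons, List.foldl_nil]
  have h1 := sound_mergeNb s d p (p.1, p.2 + 1) hk hp (by simp [pvNbrs]) hS
  exact sound_mergeNb s _ p (p.1 + 1, p.2) (by rw [keys_mergeNb]; exact hk) hp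
    (by simp [pvNbrs]) h1

lemma sound_foldl (s : List (Int × Int)) :
    ∀ (l : List (Int × Int)) (d : PySem.Dict (Int × Int) (Int × Int)),
      d.keys = s → (∀ p ∈ l, p ∈ s) → pvSound s d → pvSound s (l.foldl pvProcess d) := by
  intro l
  induction l with
  | nil => intro d _ _ hS; exact hS
  | cons p t ih =>
    intro d hk hl hS
    rw [List.foldl_cons]
    exact ih (pvProcess d p) (by rw [keys_process]; exact hk)
      (fun q hq => hl q (List.mem_cons_of_mem _ hq))
      (sound_process s d p hk (hl p (List.mem_cons_self ..)) hS)

lemma mono_process (d : PySem.Dict (Int × Int) (Int × Int)) (p x y : Int × Int)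
    (hx : x ∈ d.keys) (hy : y ∈ d.keys) (heq : pvLf d x = pvLf d y) :
    pvLf (pvProcess d p) x = pvLf (pvProcess d p) y := by
  unfold pvProcess pvNbrs2
  simp only [List.foldl_cons, List.foldl_nil]
  refine mono_mergeNb _ p _ x y ?_ ?_ (mono_mergeNb d p _ x y hx hy heq) <;>
    rw [keys_mergeNb] <;> assumption

lemma mono_foldl :
    ∀ (l : List (Int × Int)) (d : PySem.Dict (Int × Int) (Int × Int)) (x y : Int × Int),
      x ∈ d.keys → y ∈ d.keys → pvLf d x = pvLf d y →
      pvLf (l.foldl pvProcess d) x = pvLf (l.foldl pvProcess d) y := by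
  intro l
  induction l with
  | nil => intro d x y _ _ heq; exact heq
  | cons p t ih =>
    intro d x y hx hy heq
    rw [List.foldl_cons]
    exact ih (pvProcess d p) x y (by rw [keys_process]; exact hx)
      (by rw [keys_process]; exact hy) (mono_process d p x y hx hy heq)

-- processing p equalizes p with each of its right/up neighbours that is a key
lemma lf_process_edge (d : PySem.Dict (Int × Int) (Int × Int)) (p nb : Int × Int)
    (hp : p ∈ d.keys) (hnb : nb ∈ d.keys) (hmem : nb ∈ pvNbrs2 p) :
    pvLf (pvProcess d p) p = pvLf (pvProcess d p) nb := by
  unfold pvProcess pvNbrs2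
  simp only [List.foldl_cons, List.foldl_nil]
  simp only [pvNbrs2, List.mem_cons, List.not_mem_nil, or_false] at hmem
  rcases hmem with rfl | rfl
  · exact mono_mergeNb _ p _ p _ (by rw [keys_mergeNb]; exact hp)
      (by rw [keys_mergeNb]; exact hnb) (lf_mergeNb_edge d p _ hp hnb)
  · exact lf_mergeNb_edge _ p _ (by rw [keys_mergeNb]; exact hp)
      (by rw [keys_mergeNb]; exact hnb)

lemma edge_final :
    ∀ (l : List (Int × Int)) (d : PySem.Dict (Int × Int) (Int × Int)) (u v : Int × Int),
      u ∈ l → u ∈ d.keys → v ∈ d.keys → v ∈ pvNbrs2 u →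
      pvLf (l.foldl pvProcess d) u = pvLf (l.foldl pvProcess d) v := by
  intro l
  induction l with
  | nil => intro d u v hu; cases hu
  | cons p t ih =>
    intro d u v hul hu hv hmem
    rw [List.foldl_cons]
    rcases List.mem_cons.mp hul with rfl | hul
    · exact mono_foldl t (pvProcess d u) u v (by rw [keys_process]; exact hu)
        (by rw [keys_process]; exact hv) (lf_process_edge d u v hu hv hmem)
    · exact ih (pvProcess d p) u v hul (by rw [keys_process]; exact hu)
        (by rw [keys_process]; exact hv) hmem

-- the initial dict {p: p for p in s}
lemma init_items (s : List (Int × Int)) (hnd : s.Nodup) :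
    (s.foldl (fun d p => d.insert p p) PySem.Dict.empty).items
      = s.map (fun p => (p, p)) := by
  have h := PySem.Dict.items_foldl_insert_fresh (l := s) (k := fun a => a) (v := fun a => a)
    (d := PySem.Dict.empty) (by intro a _; simp) (by simpa using hnd)
  simpa using h

lemma init_keys (s : List (Int × Int)) (hnd : s.Nodup) :
    (s.foldl (fun d p => d.insert p p) PySem.Dict.empty).keys = s := by
  simp [PySem.Dict.keys, init_items s hnd, Function.comp_def]

lemma init_get? (s : List (Int × Int)) (hnd : s.Nodup) (p : Int × Int) (hp : p ∈ s) :
    (s.foldl (fun d p => d.insert p p) PySem.Dict.empty).get? p = some p := by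
  apply PySem.Dict.get?_of_mem_items
  · rw [init_items s hnd]
    exact List.mem_map.mpr ⟨p, hp, rfl⟩
  · rw [init_keys s hnd]; exact hnd

lemma sound_init (s : List (Int × Int)) (hnd : s.Nodup) :
    pvSound s (s.foldl (fun d p => d.insert p p) PySem.Dict.empty) := by
  intro x hx y hy heq
  rw [pvLf_of_get? _ x x (init_get? s hnd x hx),
    pvLf_of_get? _ y y (init_get? s hnd y hy)] at heq
  rw [heq]
  exact Relation.ReflTransGen.refl

-- every grid edge is the right/up edge of one of its endpoints
lemma nbrs_split (a b : Int × Int) (h : b ∈ pvNbrs a) :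
    b ∈ pvNbrs2 a ∨ a ∈ pvNbrs2 b := by
  obtain ⟨a1, a2⟩ := a; obtain ⟨b1, b2⟩ := b
  simp only [pvNbrs, pvNbrs2, List.mem_cons, List.not_mem_nil, or_false,
    Prod.mk.injEq] at *
  rcases h with ⟨h1, h2⟩ | ⟨h1, h2⟩ | ⟨h1, h2⟩ | ⟨h1, h2⟩
  · exact Or.inl (Or.inl ⟨by omega, by omega⟩)
  · exact Or.inr (Or.inl ⟨by omega, by omega⟩)
  · exact Or.inl (Or.inr ⟨by omega, by omega⟩)
  · exact Or.inr (Or.inr ⟨by omega, by omega⟩)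

-- completeness: reachable points end with equal labels
lemma comp_reach (s : List (Int × Int)) (hnd : s.Nodup) (a x : Int × Int) (ha : a ∈ s)
    (h : pvReach s a x) :
    pvLf (s.foldl pvProcess (s.foldl (fun d p => d.insert p p) PySem.Dict.empty)) a
      = pvLf (s.foldl pvProcess (s.foldl (fun d p => d.insert p p) PySem.Dict.empty)) x := by
  induction h with
  | refl => rfl
  | @tail c d hac hstep ih =>
    have hc : c ∈ s := reach_mem s a c ha hac
    have hd : d ∈ s := hstep.1
    have hk := init_keys s hnd
    have hedge : pvLf (s.foldl pvProcess (s.foldl (fun d p => d.insert p p) PySem.Dict.empty)) c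
        = pvLf (s.foldl pvProcess (s.foldl (fun d p => d.insert p p) PySem.Dict.empty)) d := by
      rcases nbrs_split c d hstep.2 with h2 | h2
      · exact edge_final s _ c d hc (by rw [hk]; exact hc) (by rw [hk]; exact hd) h2
      · exact (edge_final s _ d c hd (by rw [hk]; exact hd) (by rw [hk]; exact hc) h2).symm
    exact ih.trans hedge

-- len(set(l)) <= 1 iff all elements of l are equal
lemma setlen_le_one_iff (l : List (Int × Int)) :
    (PySem.Set.ofList l).length ≤ 1 ↔ ∀ x ∈ l, ∀ y ∈ l, x = y := by
  constructor
  · intro h x hx y hy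
    have hx' : x ∈ PySem.Set.ofList l := (PySem.Set.mem_ofList _ _).mpr hx
    have hy' : y ∈ PySem.Set.ofList l := (PySem.Set.mem_ofList _ _).mpr hy
    rcases hS : PySem.Set.ofList l with _ | ⟨c, t⟩
    · rw [hS] at hx'; cases hx'
    · rw [hS] at h hx' hy'
      have ht : t = [] := by
        simp only [List.length_cons] at h
        exact List.eq_nil_of_length_eq_zero (by omega)
      subst ht
      rw [List.mem_singleton] at hx' hy'
      rw [hx', hy']
  · intro h
    rcases hS : PySem.Set.ofList l with _ | ⟨c, t⟩
    · simp
    · rcases t with _ | ⟨d, t'⟩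
      · simp
      · exfalso
        have hnd : (c :: d :: t').Nodup := hS ▸ PySem.Set.nodup_ofList l
        have hc : c ∈ l := (PySem.Set.mem_ofList _ _).mp (by rw [hS]; simp)
        have hd : d ∈ l := (PySem.Set.mem_ofList _ _).mp (by rw [hS]; simp)
        have : c = d := h c hc d hd
        rw [List.nodup_cons] at hnd
        exact hnd.1 (this ▸ List.mem_cons_self ..)

-- the final label dict's values are the labels of the points of s
lemma fin_values (s : List (Int × Int)) (hnd : s.Nodup) :
    (s.foldl pvProcess (s.foldl (fun d p => d.insert p p) PySem.Dict.empty)).values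
      = s.map (pvLf (s.foldl pvProcess (s.foldl (fun d p => d.insert p p) PySem.Dict.empty))) := by
  have hk : (s.foldl pvProcess (s.foldl (fun d p => d.insert p p) PySem.Dict.empty)).keys = s := by
    rw [keys_foldl_process, init_keys s hnd]
  have hnod : (s.foldl pvProcess (s.foldl (fun d p => d.insert p p) PySem.Dict.empty)).keys.Nodup := by
    rw [hk]; exact hnd
  rw [PySem.Dict.values_eq_map_keys _ hnod (0, 0), hk]
  apply List.map_congr_left
  intro k hk'
  obtain ⟨v, hv⟩ := mem_keys_get? _ k (hk ▸ hk')
  rw [PySem.Dict.getD_of_get?_eq_some _ _ hv, pvLf_of_get? _ k v hv]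

-- ===== VERDICT (by name: the statement is the Claim_ definition above) =====
theorem fully_connected_spec : Claim_equal_fully_connected := by
  intro s _ hpre
  obtain ⟨hne, hnd⟩ := hpre
  obtain ⟨start, rest, rfl⟩ : ∃ a l, s = a :: l := by
    cases s with
    | nil => exact absurd rfl hne
    | cons a l => exact ⟨a, l, rfl⟩
  unfold Spec_fully_connected fully_connected fully_connected_alt
  simp only []
  have hstart : start ∈ start :: rest := List.mem_cons_self ..
  have hA := bfs_spec (start :: rest) start
  have hk : ((start :: rest).foldl pvProcess
      ((start :: rest).foldl (fun d p => d.insert p p) PySem.Dict.empty)).keys = start :: rest := by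
    rw [keys_foldl_process, init_keys _ hnd]
  have hsound : pvSound (start :: rest)
      ((start :: rest).foldl pvProcess
        ((start :: rest).foldl (fun d p => d.insert p p) PySem.Dict.empty)) :=
    sound_foldl _ _ _ (init_keys _ hnd) (fun p hp => hp) (sound_init _ hnd)
  rw [fin_values _ hnd]
  by_cases hP : ∀ x ∈ start :: rest, pvReach (start :: rest) start x
  · have h1 : PySem.Set.equal (bfsLoop (start :: rest) [] [start]) (start :: rest) = true :=
      (PySem.Set.equal_iff _ _).mpr fun x =>
        ⟨fun hx => reach_mem _ _ _ hstart ((hA x).mp hx), fun hx => (hA x).mpr (hP x hx)⟩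
    have h2 : (PySem.Set.ofList ((start :: rest).map
        (pvLf ((start :: rest).foldl pvProcess
          ((start :: rest).foldl (fun d p => d.insert p p) PySem.Dict.empty))))).length ≤ 1 := by
      rw [setlen_le_one_iff]
      intro x hx y hy
      obtain ⟨x', hx', rfl⟩ := List.mem_map.mp hx
      obtain ⟨y', hy', rfl⟩ := List.mem_map.mp hy
      rw [← comp_reach _ hnd start x' hstart (hP x' hx'),
        ← comp_reach _ hnd start y' hstart (hP y' hy')]
    rw [h1, decide_eq_true h2]
    rfl
  · have h1 : PySem.Set.equal (bfsLoop (start :: rest) [] [start]) (start :: rest) = false := by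
      rw [Bool.eq_false_iff]
      intro hc
      exact hP fun x hx => (hA x).mp (((PySem.Set.equal_iff _ _).mp hc x).mpr hx)
    have h2 : ¬ (PySem.Set.ofList ((start :: rest).map
        (pvLf ((start :: rest).foldl pvProcess
          ((start :: rest).foldl (fun d p => d.insert p p) PySem.Dict.empty))))).length ≤ 1 := by
      rw [setlen_le_one_iff]
      intro hall
      refine hP fun x hx => hsound start hstart x hx ?_
      exact hall _ (List.mem_map.mpr ⟨start, hstart, rfl⟩) _ (List.mem_map.mpr ⟨x, hx, rfl⟩)
    rw [h1, decide_eq_false h2]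
    rfl
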